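-- pv_equiv track=rewrite | github.com/solo21-12/A2SV_Progress | practice/A_Shalamagando_s_workout.py | solve
-- ===== SOURCE A (Python) =====
-- from collections import defaultdict
--
-- def solve(nums):
--
--     exericise = defaultdict(int)
--     ans = {
--         0: 'chest',
--         1: 'biceps',
--         2: 'back'
--     }
--
--     for i, num in enumerate(nums):
--         idx = i % 3
--         exericise[idx] += num
--
--     max_occures = 0
--
--     for key, val in exericise.items():
--         if val > exericise[max_occures]:
--             max_occures = key
--
--     return ans[max_occures]
-- ===== SOURCE B (Python) =====
-- def solve(nums):
--     sums = [sum(nums[k::3]) for k in range(min(len(nums), 3))]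
--     best = 0
--     for i in range(1, len(sums)):
--         if sums[i] > sums[best]:
--             best = i
--     return ('chest', 'biceps', 'back')[best]
-- ===== Notes on version B (the rewrite author's own statement) =====
-- stated objective: faster
-- what changed: Replaces the defaultdict built by a per-element index-mod-3 dispatch loop (plus a dict-items argmax scan) with three strided-slice bucket sums (sum(nums[k::3]) for the buckets that actually occur) and a plain scan of at most three totals.
import Mathlib
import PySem

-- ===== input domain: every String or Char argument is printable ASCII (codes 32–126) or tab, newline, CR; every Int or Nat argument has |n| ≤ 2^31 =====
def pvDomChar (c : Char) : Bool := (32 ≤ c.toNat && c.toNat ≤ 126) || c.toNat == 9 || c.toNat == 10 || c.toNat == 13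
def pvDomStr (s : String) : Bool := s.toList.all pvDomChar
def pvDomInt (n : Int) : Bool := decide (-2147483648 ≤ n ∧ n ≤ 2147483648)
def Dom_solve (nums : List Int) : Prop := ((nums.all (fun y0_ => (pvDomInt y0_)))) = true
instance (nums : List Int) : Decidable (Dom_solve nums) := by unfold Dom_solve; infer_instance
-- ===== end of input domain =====

-- B replaces A's defaultdict-per-index accumulation by three strided-slice bucket sums plus a scan of
-- at most three totals (different decomposition; the summing is done by stdlib slices).


-- ===== PORT A =====
-- 'exericise[idx] += num' on a defaultdict(int) = modify idx 0 (· + num) (missing key counts as 0,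
-- new keys are appended in insertion order); 'exericise[max_occures]' in the comparison is getD _ 0
-- (max_occures is always a present key when the loop runs, and defaultdict's default is 0);
-- 'ans[max_occures]' never misses (max_occures ∈ {0,1,2}), so the .getD "" default is unreachable.
def solve (nums : List Int) : String :=
  let exericise : PySem.Dict Int Int :=
    (PySem.List.enumerate nums).foldl
      (fun d p => d.modify (PySem.Int.mod p.1 3) 0 (· + p.2)) PySem.Dict.empty
  let ans : PySem.Dict Int String := PySem.Dict.ofList [(0, "chest"), (1, "biceps"), (2, "back")]
  let max_occures : Int :=
    exericise.items.foldl
      (fun mo kv => if kv.2 > exericise.getD mo 0 then kv.1 else mo) 0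
  (ans.get? max_occures).getD ""

-- ===== PORT B =====
-- nums[k::3] = slice? nums (some k) none 3 (step 3 ≠ 0, so the .getD [] default is unreachable);
-- the tuple index ('chest','biceps','back')[best] is always in range, so pyGetD's "" is unreachable.
def solve_alt (nums : List Int) : String :=
  let sums : List Int :=
    (PySem.List.pyRange 0 (min (PySem.List.len nums) 3) 1).map
      (fun k => ((PySem.List.slice? nums (some k) none 3).getD []).sum)
  let best : Int :=
    (PySem.List.pyRange 1 (PySem.List.len sums) 1).foldl
      (fun b i => if PySem.List.pyGetD sums i 0 > PySem.List.pyGetD sums b 0 then i else b) 0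
  PySem.List.pyGetD ["chest", "biceps", "back"] best ""

-- ===== PRECONDITION & SPEC =====
def Spec_solve (nums : List Int) (out : String) : Prop := out = solve_alt nums
instance (nums : List Int) (out : String) : Decidable (Spec_solve nums out) := by unfold Spec_solve; infer_instance

-- ===== CLAIM (what is proved, stated in full; the proofs are below) =====
def Claim_equal_solve : Prop := ∀ (nums : List Int), Dom_solve nums → Spec_solve nums (solve nums)

-- ===== LEMMAS AND PROOFS =====

-- gAux l s k: sum of the elements of l whose (enumerate-from-s) index i has i % 3 = k.
def gAux (l : List Int) (s k : Int) : Int :=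
  (((PySem.List.enumerate l s).filter (fun p => PySem.Int.mod p.1 3 == k)).map Prod.snd).sum

-- the common argmax cascade both programs end in (earliest strictly-greater of three totals)
def pick (a b c : Int) : String :=
  if b > a then (if c > b then "back" else "biceps") else (if c > a then "back" else "chest")

-- A's dict values: the accumulation fold adds gAux to every slot.
lemma dict_fold_getD (l : List Int) : ∀ (s : Int) (d : PySem.Dict Int Int) (k : Int),
    ((PySem.List.enumerate l s).foldl
      (fun d p => d.modify (PySem.Int.mod p.1 3) 0 (· + p.2)) d).getD k 0
      = d.getD k 0 + gAux l s k := by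
  induction l with
  | nil => intro s d k; simp [gAux, PySem.List.enumerate_nil]
  | cons x xs ih =>
    intro s d k
    rw [PySem.List.enumerate_cons]
    simp only [List.foldl_cons, gAux, PySem.List.enumerate_cons, List.filter_cons]
    rw [ih]
    rw [PySem.Dict.getD_modify]
    have hmod : PySem.Int.mod s 3 = s % 3 := PySem.Int.mod_eq_emod_of_pos (by norm_num)
    by_cases h : s % 3 = k
    · rw [hmod, h]
      simp only [gAux, beq_self_eq_true, if_pos rfl, List.map_cons, List.sum_cons, if_true]
      omega
    · rw [hmod, if_neg (fun hc => h hc.symm)]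
      simp [gAux, beq_iff_eq, h]

-- A's dict keys: once 0,1,2 are present, further accumulation never changes the key list.
lemma dict_fold_keys (l : List Int) : ∀ (s : Int) (d : PySem.Dict Int Int),
    (0:Int) ∈ d.keys → (1:Int) ∈ d.keys → (2:Int) ∈ d.keys →
    ((PySem.List.enumerate l s).foldl
      (fun d p => d.modify (PySem.Int.mod p.1 3) 0 (· + p.2)) d).keys = d.keys := by
  induction l with
  | nil => intro s d _ _ _; rw [PySem.List.enumerate_nil]; rfl
  | cons x xs ih =>
    intro s d h0 h1 h2
    rw [PySem.List.enumerate_cons]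
    simp only [List.foldl_cons]
    have hmem : PySem.Int.mod s 3 ∈ d.keys := by
      have hnn := PySem.Int.mod_nonneg s (b := 3) (by norm_num)
      have hlt := PySem.Int.mod_lt s (b := 3) (by norm_num)
      have : PySem.Int.mod s 3 = 0 ∨ PySem.Int.mod s 3 = 1 ∨ PySem.Int.mod s 3 = 2 := by omega
      rcases this with h | h | h <;> rw [h] <;> assumption
    have hkeys : (d.modify (PySem.Int.mod s 3) 0 (· + x)).keys = d.keys := by
      rw [PySem.Dict.keys_modify, PySem.Dict.keys_insert_of_contains]
      exact (PySem.Dict.contains_iff_mem_keys d _).mpr hmem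
    rw [ih (s + 1) _ (by rw [hkeys]; exact h0) (by rw [hkeys]; exact h1) (by rw [hkeys]; exact h2),
      hkeys]

-- a dict whose key list is [0,1,2] is exactly its three getD values in order
lemma items_shape (d : PySem.Dict Int Int) (h : d.keys = [0, 1, 2]) :
    d.items = [(0, d.getD 0 0), (1, d.getD 1 0), (2, d.getD 2 0)] := by
  obtain ⟨l⟩ := d
  have hl : l.map Prod.fst = [0, 1, 2] := h
  match l, hl with
  | [(k0, a), (k1, b), (k2, c)], hl =>
    simp only [List.map_cons, List.map_nil, List.cons.injEq, and_true] at hl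
    obtain ⟨rfl, rfl, rfl⟩ := hl
    simp [PySem.Dict.getD, PySem.Dict.get?, PySem.Dict.items, List.find?]

-- range filter: the indices 0 ≤ j < n with j % 3 = k are exactly range(k, n, 3).
lemma range_filter_mod (k : Int) (h0 : 0 ≤ k) (h3 : k < 3) : ∀ (n : Nat),
    (PySem.List.pyRange 0 (n : Int) 1).filter (fun j => PySem.Int.mod j 3 == k)
      = PySem.List.pyRange k (n : Int) 3 := by
  intro n
  induction n with
  | zero =>
    rw [PySem.List.pyRange_of_pos _ _ (by norm_num : (0:Int) < 3)]
    rw [if_neg (by omega : ¬ k < (0:Nat))]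
    rfl
  | succ n ih =>
    have hc : ((n + 1 : Nat) : Int) = (n : Int) + 1 := by push_cast; ring
    rw [hc, PySem.List.pyRange_one_succ_right (by positivity : (0:Int) ≤ (n:Int)),
      List.filter_append, ih]
    rw [PySem.List.pyRange_of_pos _ _ (by norm_num : (0:Int) < 3),
      PySem.List.pyRange_of_pos _ _ (by norm_num : (0:Int) < 3)]
    by_cases hm : ((n % 3 : Nat) : Int) = k
    · have hkn : k < (n:Int) + 1 := by omega
      have hcnt : (if k < (n:Int) + 1 then (((n:Int) + 1 - k + 3 - 1) / 3).toNat else 0)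
          = (if k < (n:Int) then (((n:Int) - k + 3 - 1) / 3).toNat else 0) + 1 := by
        by_cases hkn' : k < (n:Int) <;> simp only [hkn, hkn', if_pos, if_neg, if_true, if_false] <;> omega
      rw [hcnt, List.range_succ, List.map_append, List.map_cons, List.map_nil]
      have hgl : k + 3 * ((if k < (n:Int) then (((n:Int) - k + 3 - 1) / 3).toNat else 0 : Nat) : Int)
          = (n : Int) := by
        by_cases hkn' : k < (n:Int) <;> simp only [hkn', if_true, if_false, if_pos, if_neg] <;> omega
      rw [hgl]
      have hb : (((n:Int) % 3 == k) = true) := by simp only [beq_iff_eq]; omega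
      simp [List.filter_singleton, hb]
    · have hcnt : (if k < (n:Int) + 1 then (((n:Int) + 1 - k + 3 - 1) / 3).toNat else 0)
          = (if k < (n:Int) then (((n:Int) - k + 3 - 1) / 3).toNat else 0) := by
        by_cases hkn' : k < (n:Int)
        · simp only [hkn', if_true, if_pos (by omega : k < (n:Int) + 1)]; omega
        · have hkn1 : ¬ k < (n:Int) + 1 := by
            intro hcon
            have : k = (n:Int) := by omega
            omega
          simp [hkn', hkn1]
      rw [hcnt]
      have : (List.filter (fun j => PySem.Int.mod j 3 == k) [(n:Int)]) = [] := by
        have hb : (((n:Int) % 3 == k) = false) := by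
          simp only [beq_eq_false_iff_ne, ne_eq]; omega
        simp [List.filter_singleton, hb]
      rw [this, List.append_nil]

-- slices with step 3: nums[k::3] reads exactly the indices range(k, len, 3).
lemma slice_step3 (xs : List Int) (k : Int) (h0 : 0 ≤ k) :
    PySem.List.slice? xs (some k) none 3
      = some ((PySem.List.pyRange k (xs.length : Int) 3).map
          (fun i => PySem.List.pyGetD xs i 0)) := by
  rw [PySem.List.pyRange_of_pos _ _ (by norm_num : (0:Int) < 3)]
  simp only [PySem.List.slice?, PySem.List.sliceIndices, if_neg (by omega : ¬ (3:Int) = 0),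
    if_neg (by omega : ¬ (3:Int) < 0), if_neg (by omega : ¬ k < 0),
    if_pos (by norm_num : (0:Int) < 3), Option.some.injEq]
  by_cases hk : k < (xs.length : Int)
  · rw [min_eq_left (by omega), if_pos hk, List.map_map]
    have hcong : ∀ j ∈ List.range ((((xs.length : Int) - k + 3 - 1) / 3).toNat),
        xs[(k + 3 * (j:Int)).toNat]?
          = (some ∘ ((fun i => PySem.List.pyGetD xs i 0) ∘ (fun j : Nat => k + 3 * (j:Int)))) j := by
      intro j hj
      rw [List.mem_range] at hj
      have hlt : k + 3 * (j:Int) < (xs.length : Int) := by omega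
      have hnn : 0 ≤ k + 3 * (j:Int) := by omega
      simp only [Function.comp_apply]
      rw [PySem.List.pyGetD_eq_getElem xs 0 hnn hlt, List.getElem?_eq_getElem (by omega)]
    rw [List.filterMap_congr hcong, List.filterMap_eq_map]
  · rw [min_eq_right (not_lt.mp hk), if_neg (lt_irrefl _), if_neg hk]
    simp

-- B's bucket sums are gAux.
lemma slice_sum_eq_gAux (xs : List Int) (k : Int) (h0 : 0 ≤ k) (h3 : k < 3) :
    ((PySem.List.slice? xs (some k) none 3).getD []).sum = gAux xs 0 k := by
  rw [slice_step3 xs k h0, Option.getD_some, gAux,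
    PySem.List.enumerate_eq_map_pyRange xs (0 : Int), List.filter_map, List.map_map,
    ← range_filter_mod k h0 h3 xs.length]
  rfl

-- A on lists of length ≥ 3 is the three-way cascade on gAux.
lemma solve_cons3 (x y z : Int) (rest : List Int) :
    solve (x :: y :: z :: rest)
      = pick (gAux (x :: y :: z :: rest) 0 0) (gAux (x :: y :: z :: rest) 0 1)
          (gAux (x :: y :: z :: rest) 0 2) := by
  simp only [solve]
  have hE : ((PySem.List.enumerate (x :: y :: z :: rest)).foldl
      (fun d p => d.modify (PySem.Int.mod p.1 3) 0 (· + p.2)) PySem.Dict.empty)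
      = ((PySem.List.enumerate rest 3).foldl
          (fun d p => d.modify (PySem.Int.mod p.1 3) 0 (· + p.2))
          (PySem.Dict.mk [(0, 0 + x), (1, 0 + y), (2, 0 + z)])) := rfl
  have hkeys : ((PySem.List.enumerate (x :: y :: z :: rest)).foldl
      (fun d p => d.modify (PySem.Int.mod p.1 3) 0 (· + p.2)) PySem.Dict.empty).keys
      = [0, 1, 2] := by
    rw [hE, dict_fold_keys rest 3 _ (by simp [PySem.Dict.keys]) (by simp [PySem.Dict.keys])
      (by simp [PySem.Dict.keys])]
    rfl
  have hv0 := dict_fold_getD (x :: y :: z :: rest) 0 PySem.Dict.empty 0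
  have hv1 := dict_fold_getD (x :: y :: z :: rest) 0 PySem.Dict.empty 1
  have hv2 := dict_fold_getD (x :: y :: z :: rest) 0 PySem.Dict.empty 2
  rw [PySem.Dict.getD_empty, zero_add] at hv0 hv1 hv2
  rw [items_shape _ hkeys, hv0, hv1, hv2]
  simp only [List.foldl_cons, List.foldl_nil]
  rw [hv0, if_neg (lt_irrefl _), hv0]
  by_cases h1 : gAux (x :: y :: z :: rest) 0 0 < gAux (x :: y :: z :: rest) 0 1
  · rw [if_pos h1, hv1]
    by_cases h2 : gAux (x :: y :: z :: rest) 0 1 < gAux (x :: y :: z :: rest) 0 2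
    · rw [if_pos h2]; simp only [pick, if_pos h1, if_pos h2]; rfl
    · rw [if_neg h2]; simp only [pick, if_pos h1, if_neg h2]; rfl
  · rw [if_neg h1, hv0]
    by_cases h2 : gAux (x :: y :: z :: rest) 0 0 < gAux (x :: y :: z :: rest) 0 2
    · rw [if_pos h2]; simp only [pick, if_neg h1, if_pos h2]; rfl
    · rw [if_neg h2]; simp only [pick, if_neg h1, if_neg h2]; rfl

-- B on lists of length ≥ 3 is the same cascade.
lemma solve_alt_cons3 (x y z : Int) (rest : List Int) :
    solve_alt (x :: y :: z :: rest)
      = pick (gAux (x :: y :: z :: rest) 0 0) (gAux (x :: y :: z :: rest) 0 1)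
          (gAux (x :: y :: z :: rest) 0 2) := by
  simp only [solve_alt]
  rw [show min (PySem.List.len (x :: y :: z :: rest)) 3 = 3 from
      min_eq_right (by simp [PySem.List.len]; omega)]
  rw [show PySem.List.pyRange 0 3 1 = [0, 1, 2] from by decide]
  simp only [List.map_cons, List.map_nil,
    slice_sum_eq_gAux _ 0 (by norm_num) (by norm_num),
    slice_sum_eq_gAux _ 1 (by norm_num) (by norm_num),
    slice_sum_eq_gAux _ 2 (by norm_num) (by norm_num)]
  simp only [show PySem.List.len [gAux (x :: y :: z :: rest) 0 0, gAux (x :: y :: z :: rest) 0 1,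
      gAux (x :: y :: z :: rest) 0 2] = 3 from by simp [PySem.List.len],
    show PySem.List.pyRange 1 3 1 = [1, 2] from by decide,
    List.foldl_cons, List.foldl_nil,
    show ∀ a b c : Int, PySem.List.pyGetD [a, b, c] 0 0 = a from fun a b c => rfl,
    show ∀ a b c : Int, PySem.List.pyGetD [a, b, c] 1 0 = b from fun a b c => rfl,
    show ∀ a b c : Int, PySem.List.pyGetD [a, b, c] 2 0 = c from fun a b c => rfl]
  by_cases h1 : gAux (x :: y :: z :: rest) 0 0 < gAux (x :: y :: z :: rest) 0 1
  · simp only [if_pos h1,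
      show ∀ a b c : Int, PySem.List.pyGetD [a, b, c] 1 0 = b from fun a b c => rfl]
    by_cases h2 : gAux (x :: y :: z :: rest) 0 1 < gAux (x :: y :: z :: rest) 0 2
    · simp only [if_pos h2]; simp only [pick, if_pos h1, if_pos h2]; rfl
    · simp only [if_neg h2]; simp only [pick, if_pos h1, if_neg h2]; rfl
  · simp only [if_neg h1,
      show ∀ a b c : Int, PySem.List.pyGetD [a, b, c] 0 0 = a from fun a b c => rfl]
    by_cases h2 : gAux (x :: y :: z :: rest) 0 0 < gAux (x :: y :: z :: rest) 0 2
    · simp only [if_pos h2]; simp only [pick, if_neg h1, if_pos h2]; rfl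
    · simp only [if_neg h2]; simp only [pick, if_neg h1, if_neg h2]; rfl

lemma solve_one (x : Int) : solve [x] = "chest" := by
  simp only [solve]
  rw [show ((PySem.List.enumerate [x]).foldl
      (fun d p => d.modify (PySem.Int.mod p.1 3) 0 (· + p.2)) PySem.Dict.empty)
      = PySem.Dict.mk [(0, 0 + x)] from rfl]
  show ((PySem.Dict.ofList [((0:Int), "chest"), (1, "biceps"), (2, "back")]).get?
    (if 0 + x > 0 + x then 0 else 0)).getD "" = "chest"
  rw [if_neg (lt_irrefl _)]
  rfl

lemma solve_alt_one (x : Int) : solve_alt [x] = "chest" := by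
  simp only [solve_alt]
  rw [show ((PySem.List.pyRange 0 (min (PySem.List.len [x]) 3) 1).map
      (fun k => ((PySem.List.slice? [x] (some k) none 3).getD []).sum)) = [x + 0] from by
    simp [PySem.List.pyRange, PySem.List.len, PySem.List.slice?, PySem.List.sliceIndices,
      List.range_succ]]
  rfl

lemma solve_two (x y : Int) : solve [x, y] = (if 0 + x < 0 + y then "biceps" else "chest") := by
  simp only [solve]
  rw [show ((PySem.List.enumerate [x, y]).foldl
      (fun d p => d.modify (PySem.Int.mod p.1 3) 0 (· + p.2)) PySem.Dict.empty)
      = PySem.Dict.mk [(0, 0 + x), (1, 0 + y)] from rfl]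
  show ((PySem.Dict.ofList [((0:Int), "chest"), (1, "biceps"), (2, "back")]).get?
    (if 0 + y > (PySem.Dict.mk [((0:Int), 0 + x), (1, 0 + y)]).getD (if 0 + x > 0 + x then 0 else 0) 0
      then 1 else (if 0 + x > 0 + x then 0 else 0))).getD ""
    = (if 0 + x < 0 + y then "biceps" else "chest")
  rw [if_neg (lt_irrefl _)]
  rw [show (PySem.Dict.mk [((0:Int), 0 + x), (1, 0 + y)]).getD 0 0 = 0 + x from rfl]
  by_cases h : 0 + x < 0 + y
  · rw [if_pos h, if_pos h]; rfl
  · rw [if_neg h, if_neg h]; rfl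

lemma solve_alt_two (x y : Int) :
    solve_alt [x, y] = (if 0 + x < 0 + y then "biceps" else "chest") := by
  simp only [solve_alt]
  rw [show ((PySem.List.pyRange 0 (min (PySem.List.len [x, y]) 3) 1).map
      (fun k => ((PySem.List.slice? [x, y] (some k) none 3).getD []).sum)) = [x + 0, y + 0] from by
    simp [PySem.List.pyRange, PySem.List.len, PySem.List.slice?, PySem.List.sliceIndices,
      List.range_succ]]
  rw [show PySem.List.len [x + 0, y + 0] = (2:Int) from by simp [PySem.List.len],
      show PySem.List.pyRange 1 2 1 = [(1:Int)] from by decide]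
  show (PySem.List.pyGetD ["chest", "biceps", "back"]
    (List.foldl (fun b i => if PySem.List.pyGetD [x + 0, y + 0] i 0 >
        PySem.List.pyGetD [x + 0, y + 0] b 0 then i else b) 0 [1]) "")
    = (if 0 + x < 0 + y then "biceps" else "chest")
  simp only [List.foldl_cons, List.foldl_nil]
  rw [show PySem.List.pyGetD [x + 0, y + 0] 1 0 = y + 0 from rfl,
      show PySem.List.pyGetD [x + 0, y + 0] 0 0 = x + 0 from rfl]
  by_cases h : 0 + x < 0 + y
  · rw [if_pos (by omega), if_pos h]; rfl
  · rw [if_neg (by omega), if_neg h]; rfl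

-- ===== VERDICT (by name: the statement is the Claim_ definition above) =====
theorem solve_spec : Claim_equal_solve := by
  intro nums _
  unfold Spec_solve
  match nums with
  | [] => rfl
  | [x] => rw [solve_one, solve_alt_one]
  | [x, y] => rw [solve_two, solve_alt_two]
  | x :: y :: z :: rest => rw [solve_cons3, solve_alt_cons3]
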